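-- pv_equiv track=rewrite | github.com/fhernandogamaoliveira/fhernandogamaoliveira | Torre_hanoi/funcoes_auxiliares.py | encontrar_maior_disco
-- ===== SOURCE A (Python) =====
-- def encontrar_maior_disco(pinos,destino):
--     maior_disco = -1
--     pino_maior_disco = None
--     for i, pino in enumerate(pinos):
--         if i != destino and pino:  # Ignora o pino de destino
--             maior_disco_no_pino = max(pino)
--             if maior_disco == -1 or maior_disco_no_pino > maior_disco:
--                 maior_disco = maior_disco_no_pino
--                 pino_maior_disco = i
--     return pino_maior_disco, maior_disco
-- ===== SOURCE B (Python) =====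
-- def encontrar_maior_disco(pinos, destino):
--     # gather (index, peak) for every non-destination, non-empty peg
--     candidatos = [(i, max(pino)) for i, pino in enumerate(pinos) if i != destino and pino]
--     if not candidatos:
--         return None, -1
--     alvo = max(m for _, m in candidatos)
--     for i, m in candidatos:
--         if m == alvo:
--             return i, m
-- ===== Notes on version B (the rewrite author's own statement) =====
-- stated objective: simpler
-- what changed: Replaces A's single running-max/argmax loop with a -1 sentinel by a sentinel-free gather-then-select decomposition: build the list of (peg index, peg maximum) for non-destination non-empty pegs, compute the overall maximum, and return its first holder.
-- intended difference: On inputs where every disk on every considered (non-destination, non-empty) peg is <= -1 and some considered peg other than the last one holds a -1, A's running maximum collides with its -1 sentinel so A returns a later peg with a smaller maximum (e.g. A([[-1],[-5]],2) = (1,-5)), while B returns the first peg holding the true largest disk -1 (B gives (0,-1)), which is the intended value. — e.g. on encontrar_maior_disco([[-1], [-5]], 2): A returns (some 1, -5), B returns (some 0, -1)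
import Mathlib
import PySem

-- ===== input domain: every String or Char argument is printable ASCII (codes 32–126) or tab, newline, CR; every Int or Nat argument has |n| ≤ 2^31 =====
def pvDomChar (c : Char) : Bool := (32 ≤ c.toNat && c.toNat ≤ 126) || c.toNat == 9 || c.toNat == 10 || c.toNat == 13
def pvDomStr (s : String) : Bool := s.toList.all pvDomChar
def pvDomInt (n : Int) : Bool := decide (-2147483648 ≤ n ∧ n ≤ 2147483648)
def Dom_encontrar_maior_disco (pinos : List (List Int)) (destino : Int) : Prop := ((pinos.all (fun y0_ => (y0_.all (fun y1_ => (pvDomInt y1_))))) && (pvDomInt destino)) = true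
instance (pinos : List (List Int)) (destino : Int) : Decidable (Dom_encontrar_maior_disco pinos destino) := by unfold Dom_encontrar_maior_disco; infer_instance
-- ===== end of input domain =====

-- B replaces A's sentinel-driven running-max loop by gather (index, peg maximum) / take the overall
-- maximum / return its first holder — a plainer decomposition with no sentinel state ('simpler').

-- ===== PORT A =====
def encontrar_maior_disco (pinos : List (List Int)) (destino : Int) : Option Int × Int :=
  let r := (PySem.List.enumerate pinos).foldl
    (fun (st : Int × Option Int) (ip : Int × List Int) =>
      if ip.1 ≠ destino ∧ ip.2 ≠ [] then
        match PySem.List.max? ip.2 (fun x => x) with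
        | some m => if st.1 = -1 ∨ m > st.1 then (m, some ip.1) else st
        | none => st  -- unreachable: the guard ensures the peg is non-empty
      else st) ((-1 : Int), (none : Option Int))
  (r.2, r.1)

-- ===== PORT B =====
-- B-side helper: the candidatos list of Source B — (peg index, largest disk) for each
-- non-destination, non-empty peg, in peg order
def pvCands (pinos : List (List Int)) (destino : Int) : List (Int × Int) :=
  (PySem.List.enumerate pinos).filterMap (fun ip =>
    if ip.1 ≠ destino ∧ ip.2 ≠ [] then
      (PySem.List.max? ip.2 (fun x => x)).map (fun m => (ip.1, m))
    else none)

def encontrar_maior_disco_alt (pinos : List (List Int)) (destino : Int) : Option Int × Int :=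
  let candidatos := pvCands pinos destino
  match PySem.List.max? (candidatos.map (fun c => c.2)) (fun x => x) with
  | none => (none, -1)  -- candidatos is empty
  | some alvo =>
    match candidatos.find? (fun c => c.2 == alvo) with
    | some c => (some c.1, c.2)
    | none => (none, -1)  -- unreachable: alvo is attained in candidatos

-- ===== PRECONDITION & SPEC =====
-- On inputs where every disk on every considered (non-destination, non-empty) peg is ≤ -1 and some
-- considered peg other than the last one holds a -1, A's running maximum collides with its -1
-- sentinel and A returns a later peg with a smaller maximum, while B returns the first peg holding
-- the true largest disk -1, the intended value.
def D_encontrar_maior_disco (pinos : List (List Int)) (destino : Int) : Prop :=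
  let C := (PySem.List.enumerate pinos).filter fun p => p.1 ≠ destino ∧ p.2 ≠ []
  (∀ p ∈ C, ∀ x ∈ p.2, x ≤ -1) ∧ ∃ p ∈ C.dropLast, (-1 : Int) ∈ p.2
instance (pinos : List (List Int)) (destino : Int) : Decidable (D_encontrar_maior_disco pinos destino) := by unfold D_encontrar_maior_disco; infer_instance

def Spec_encontrar_maior_disco (pinos : List (List Int)) (destino : Int) (out : Option Int × Int) : Prop := ¬ D_encontrar_maior_disco pinos destino → out = encontrar_maior_disco_alt pinos destino
instance (pinos : List (List Int)) (destino : Int) (out : Option Int × Int) : Decidable (Spec_encontrar_maior_disco pinos destino out) := by unfold Spec_encontrar_maior_disco; infer_instance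

def pvDiffWitness_encontrar_maior_disco : List (List Int) × Int := ([[-1], [-5]], 2)
def pvDiffWitnessOut_encontrar_maior_disco : (Option Int × Int) × (Option Int × Int) := ((some 1, -5), (some 0, -1))

-- ===== CLAIM (what is proved, stated in full; the proofs are below) =====
def Claim_unchanged_encontrar_maior_disco : Prop := ∀ (pinos : List (List Int)) (destino : Int), Dom_encontrar_maior_disco pinos destino → Spec_encontrar_maior_disco pinos destino (encontrar_maior_disco pinos destino)
def Claim_exact_encontrar_maior_disco : Prop := ∀ (pinos : List (List Int)) (destino : Int), Dom_encontrar_maior_disco pinos destino → D_encontrar_maior_disco pinos destino → encontrar_maior_disco pinos destino ≠ encontrar_maior_disco_alt pinos destino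
def Claim_changed_encontrar_maior_disco : Prop := Dom_encontrar_maior_disco (pvDiffWitness_encontrar_maior_disco.1) (pvDiffWitness_encontrar_maior_disco.2) ∧ D_encontrar_maior_disco (pvDiffWitness_encontrar_maior_disco.1) (pvDiffWitness_encontrar_maior_disco.2) ∧ encontrar_maior_disco (pvDiffWitness_encontrar_maior_disco.1) (pvDiffWitness_encontrar_maior_disco.2) = pvDiffWitnessOut_encontrar_maior_disco.1 ∧ encontrar_maior_disco_alt (pvDiffWitness_encontrar_maior_disco.1) (pvDiffWitness_encontrar_maior_disco.2) = pvDiffWitnessOut_encontrar_maior_disco.2 ∧ pvDiffWitnessOut_encontrar_maior_disco.1 ≠ pvDiffWitnessOut_encontrar_maior_disco.2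

-- ===== LEMMAS AND PROOFS =====

-- A's loop body, reformulated over the candidate list (proof-only helper)
def pvStepA (st : Int × Option Int) (c : Int × Int) : Int × Option Int :=
  if st.1 = -1 ∨ c.2 > st.1 then (c.2, some c.1) else st

-- running maximum of the second components, seeded with v
def pvW (v : Int) (t : List (Int × Int)) : Int := t.foldl (fun a x => max a x.2) v

theorem le_pvW : ∀ (t : List (Int × Int)) (v : Int), v ≤ pvW v t := by
  intro t
  induction t with
  | nil => intro v; simp [pvW]
  | cons c t ih =>
    intro v
    have h := ih (max v c.2)
    simp only [pvW, List.foldl_cons] at h ⊢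
    exact le_trans (le_max_left v c.2) h

theorem pvW_ub : ∀ (t : List (Int × Int)) (v : Int), ∀ c ∈ t, c.2 ≤ pvW v t := by
  intro t
  induction t with
  | nil => intro v c hc; cases hc
  | cons d t ih =>
    intro v c hc
    rcases List.mem_cons.mp hc with rfl | hc
    · simp only [pvW, List.foldl_cons]
      exact le_trans (le_max_right v c.2) (le_pvW t (max v c.2))
    · exact ih (max v d.2) c hc

theorem pvW_attained : ∀ (t : List (Int × Int)) (v : Int), pvW v t = v ∨ ∃ c ∈ t, c.2 = pvW v t := by
  intro t
  induction t with
  | nil => intro v; left; rfl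
  | cons d t ih =>
    intro v
    rcases ih (max v d.2) with h | ⟨c, hc, hcv⟩
    · have h' : pvW v (d :: t) = max v d.2 := h
      rcases le_total v d.2 with hv | hv
      · right; exact ⟨d, List.mem_cons_self .., by rw [h']; omega⟩
      · left; rw [h']; omega
    · right; exact ⟨c, List.mem_cons_of_mem _ hc, hcv⟩

theorem pvW_mono : ∀ (t : List (Int × Int)) (a b : Int), a ≤ b → pvW a t ≤ pvW b t := by
  intro t
  induction t with
  | nil => intro a b h; exact h
  | cons d t ih =>
    intro a b h
    exact ih (max a d.2) (max b d.2) (by omega)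

theorem pvW_le_max : ∀ (t : List (Int × Int)) (a b : Int), pvW b t ≤ max b (pvW a t) := by
  intro t
  induction t with
  | nil => intro a b; simp [pvW]
  | cons d t ih =>
    intro a b
    have h1 := ih (max a d.2) (max b d.2)
    have h2 : d.2 ≤ pvW (max a d.2) t :=
      le_trans (le_max_right a d.2) (le_pvW t (max a d.2))
    simp only [pvW] at h1 h2 ⊢
    simp only [List.foldl_cons]
    omega

-- main characterisation of A's loop when the running maximum never re-hits the sentinel at the end
theorem pvLoopA_spec : ∀ (t : List (Int × Int)) (v : Int) (p : Option Int), pvW v t ≠ -1 →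
    t.foldl pvStepA (v, p) =
      if v = pvW v t then (v, p)
      else (t.find? (fun c => c.2 == pvW v t)).elim (v, p) (fun c => (c.2, some c.1)) := by
  intro t
  induction t with
  | nil => intro v p _; simp [pvW]
  | cons c t ih =>
    intro v p hW
    have hWc : pvW v (c :: t) = pvW (max v c.2) t := rfl
    have hvle : v ≤ pvW v (c :: t) := le_pvW _ v
    have hcle : c.2 ≤ pvW v (c :: t) := pvW_ub _ v c (List.mem_cons_self ..)
    simp only [List.foldl_cons]
    by_cases hfire : v = -1 ∨ c.2 > v
    · -- A's update fires on the head
      have hstep : pvStepA (v, p) c = (c.2, some c.1) := by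
        simp only [pvStepA]; rw [if_pos hfire]
      rw [hstep]
      have hvne : v ≠ pvW v (c :: t) := by
        rcases hfire with h1 | h1
        · rw [h1] at hW ⊢; exact fun he => hW he.symm
        · omega
      have hWeq : pvW c.2 t = pvW v (c :: t) := by
        rcases le_total v c.2 with h | h
        · rw [hWc, max_eq_right h]
        · have hWt : pvW v (c :: t) = pvW v t := by rw [hWc, max_eq_left h]
          have h1 : pvW c.2 t ≤ pvW v t := pvW_mono t c.2 v h
          have h2 : pvW v t ≤ max v (pvW c.2 t) := pvW_le_max t c.2 v
          have h3 : v < pvW v (c :: t) := lt_of_le_of_ne hvle hvne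
          rw [hWt] at h3 ⊢
          omega
      have ihr := ih c.2 (some c.1) (by rw [hWeq]; exact hW)
      rw [hWeq] at ihr
      rw [ihr, if_neg hvne]
      by_cases hc2 : c.2 = pvW v (c :: t)
      · rw [if_pos hc2, List.find?_cons_of_pos (by simp [hc2])]
        rfl
      · rw [if_neg hc2, List.find?_cons_of_neg (by simp [hc2])]
        -- the maximum is attained in t, so both defaults are irrelevant
        rcases pvW_attained (c :: t) v with h | ⟨d, hd, hdv⟩
        · exact absurd h.symm hvne
        · rcases List.mem_cons.mp hd with rfl | hd
          · exact absurd hdv hc2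
          · have hs : (t.find? (fun x => x.2 == pvW v (c :: t))).isSome :=
              List.find?_isSome.mpr ⟨d, hd, by simp [hdv]⟩
            rcases Option.isSome_iff_exists.mp hs with ⟨e, he⟩
            rw [he]; rfl
    · -- the head is skipped
      push_neg at hfire
      have hstep : pvStepA (v, p) c = (v, p) := by
        simp only [pvStepA]; rw [if_neg (by push_neg; omega)]
      rw [hstep]
      have hWt : pvW v (c :: t) = pvW v t := by rw [hWc, max_eq_left (by omega)]
      have ihr := ih v p (by rw [← hWt]; exact hW)
      rw [← hWt] at ihr
      rw [ihr]
      by_cases hv : v = pvW v (c :: t)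
      · rw [if_pos hv, if_pos hv]
      · rw [if_neg hv, if_neg hv, List.find?_cons_of_neg (by simp; omega)]

-- when everything stays strictly below -1 the sentinel never re-fires and the state stays below -1
theorem pvLoopA_fst_lt : ∀ (t : List (Int × Int)) (v : Int) (p : Option Int), v < -1 →
    (∀ c ∈ t, c.2 < -1) → (t.foldl pvStepA (v, p)).1 < -1 := by
  intro t
  induction t with
  | nil => intro v p hv _; exact hv
  | cons c t ih =>
    intro v p hv hall
    have hc := hall c (List.mem_cons_self ..)
    have hrest := fun d hd => hall d (List.mem_cons_of_mem _ hd)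
    simp only [List.foldl_cons, pvStepA]
    split
    · exact ih c.2 (some c.1) hc hrest
    · exact ih v p hv hrest

-- membership description of the candidate list
theorem pvCands_mem (pinos : List (List Int)) (destino : Int) (c : Int × Int) :
    c ∈ pvCands pinos destino ↔
      ∃ ip ∈ PySem.List.enumerate pinos, (ip.1 ≠ destino ∧ ip.2 ≠ []) ∧
        PySem.List.max? ip.2 (fun x => x) = some c.2 ∧ c.1 = ip.1 := by
  rw [pvCands, List.mem_filterMap]
  constructor
  · rintro ⟨ip, hip, hg⟩
    by_cases h : ip.1 ≠ destino ∧ ip.2 ≠ []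
    · rw [if_pos h] at hg
      rcases Option.map_eq_some_iff.mp hg with ⟨m, hm, hc⟩
      subst hc
      exact ⟨ip, hip, h, hm, rfl⟩
    · rw [if_neg h] at hg; cases hg
  · rintro ⟨ip, hip, hK, hmax, hfst⟩
    refine ⟨ip, hip, ?_⟩
    rw [if_pos hK, hmax]
    simp only [Option.map_some]
    have hcc : c = (ip.1, c.2) := Prod.ext hfst rfl
    rw [← hcc]

-- A's guarded fold over the enumeration is the plain fold of pvStepA over the candidate list
theorem pvA_eq_fold (pinos : List (List Int)) (destino : Int) :
    encontrar_maior_disco pinos destino =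
      (((pvCands pinos destino).foldl pvStepA ((-1 : Int), (none : Option Int))).2,
       ((pvCands pinos destino).foldl pvStepA ((-1 : Int), (none : Option Int))).1) := by
  have key : ∀ (l : List (Int × List Int)) (st : Int × Option Int),
      List.foldl (fun (st : Int × Option Int) (ip : Int × List Int) =>
        if ip.1 ≠ destino ∧ ip.2 ≠ [] then
          match PySem.List.max? ip.2 (fun x => x) with
          | some m => if st.1 = -1 ∨ m > st.1 then (m, some ip.1) else st
          | none => st
        else st) st l
      = List.foldl pvStepA st (l.filterMap (fun ip =>
          if ip.1 ≠ destino ∧ ip.2 ≠ [] then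
            (PySem.List.max? ip.2 (fun x => x)).map (fun m => (ip.1, m))
          else none)) := by
    intro l
    induction l with
    | nil => intro st; rfl
    | cons ip l ih =>
      intro st
      by_cases h : ip.1 ≠ destino ∧ ip.2 ≠ []
      · cases hm : PySem.List.max? ip.2 (fun x => x) with
        | none =>
          simp only [List.foldl_cons, List.filterMap_cons, if_pos h, hm, Option.map_none]
          exact ih st
        | some m =>
          simp only [List.foldl_cons, List.filterMap_cons, if_pos h, hm, Option.map_some]
          rw [ih]
          rfl
      · simp only [List.foldl_cons, List.filterMap_cons, if_neg h]
        exact ih st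
  show ((List.foldl (fun (st : Int × Option Int) (ip : Int × List Int) =>
        if ip.1 ≠ destino ∧ ip.2 ≠ [] then
          match PySem.List.max? ip.2 (fun x => x) with
          | some m => if st.1 = -1 ∨ m > st.1 then (m, some ip.1) else st
          | none => st
        else st) ((-1 : Int), (none : Option Int)) (PySem.List.enumerate pinos)).2,
      (List.foldl (fun (st : Int × Option Int) (ip : Int × List Int) =>
        if ip.1 ≠ destino ∧ ip.2 ≠ [] then
          match PySem.List.max? ip.2 (fun x => x) with
          | some m => if st.1 = -1 ∨ m > st.1 then (m, some ip.1) else st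
          | none => st
        else st) ((-1 : Int), (none : Option Int)) (PySem.List.enumerate pinos)).1)
    = (((pvCands pinos destino).foldl pvStepA ((-1 : Int), (none : Option Int))).2,
       ((pvCands pinos destino).foldl pvStepA ((-1 : Int), (none : Option Int))).1)
  rw [key, pvCands]

theorem pvCands_fst (pinos : List (List Int)) (destino : Int) :
    List.Pairwise (fun a b => a.1 < b.1) (pvCands pinos destino) := by
  rw [pvCands, List.pairwise_filterMap]
  refine (PySem.List.pairwise_lt_enumerate pinos 0).imp ?_
  intro a b hab c hc c' hc'
  have e1 : c.1 = a.1 := by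
    by_cases h : a.1 ≠ destino ∧ a.2 ≠ []
    · rw [if_pos h] at hc
      rcases Option.map_eq_some_iff.mp hc with ⟨m, _, hcm⟩
      subst hcm; rfl
    · rw [if_neg h] at hc; cases hc
  have e2 : c'.1 = b.1 := by
    by_cases h : b.1 ≠ destino ∧ b.2 ≠ []
    · rw [if_pos h] at hc'
      rcases Option.map_eq_some_iff.mp hc' with ⟨m, _, hcm⟩
      subst hcm; rfl
    · rw [if_neg h] at hc'; cases hc'
  rw [e1, e2]; exact hab

-- considered pegs and the candidate a considered peg contributes (proof-only helpers)
def pvCons (pinos : List (List Int)) (destino : Int) : List (Int × List Int) :=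
  (PySem.List.enumerate pinos).filter fun p => p.1 ≠ destino ∧ p.2 ≠ []

def pvToCand (p : Int × List Int) : Int × Int :=
  (p.1, (PySem.List.max? p.2 (fun x => x)).getD 0)

theorem pvCands_eq_map (pinos : List (List Int)) (destino : Int) :
    pvCands pinos destino = (pvCons pinos destino).map pvToCand := by
  rw [pvCands, pvCons]
  induction PySem.List.enumerate pinos with
  | nil => rfl
  | cons ip l ih =>
    by_cases h : ip.1 ≠ destino ∧ ip.2 ≠ []
    · cases hm : PySem.List.max? ip.2 (fun x => x) with
      | none => exact absurd ((PySem.List.max?_eq_none_iff _ _).mp hm) h.2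
      | some m =>
        simp only [List.filterMap_cons, List.filter_cons, List.map_cons, if_pos h, hm,
          Option.map_some, decide_eq_true_eq, pvToCand]
        rw [ih]
        simp
    · simp only [List.filterMap_cons, List.filter_cons, if_neg h]
      have hb : (decide (ip.1 ≠ destino ∧ ip.2 ≠ [])) = false := by simpa using h
      rw [hb]
      exact ih

-- once A's loop carries an index, the final index is the carried one or one from the list
theorem pvLoopA_idx : ∀ (t : List (Int × Int)) (v j : Int),
    (t.foldl pvStepA (v, some j)).2 = some j ∨
      ∃ e ∈ t, (t.foldl pvStepA (v, some j)).2 = some e.1 := by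
  intro t
  induction t with
  | nil => intro v j; left; rfl
  | cons d t ih =>
    intro v j
    simp only [List.foldl_cons, pvStepA]
    split
    · rcases ih d.2 d.1 with h | ⟨e, he, hee⟩
      · right; exact ⟨d, List.mem_cons_self .., h⟩
      · right; exact ⟨e, List.mem_cons_of_mem _ he, hee⟩
    · rcases ih v j with h | ⟨e, he, hee⟩
      · left; exact h
      · right; exact ⟨e, List.mem_cons_of_mem _ he, hee⟩

-- ===== VERDICT (by name: the statement is the Claim_ definition above) =====
-- the candidate list's head-seeded running maximum (relates pvW to Source B's alvo)
theorem pvAlvo (c0 : Int × Int) (t : List (Int × Int)) :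
    PySem.List.max? ((c0 :: t).map (fun c => c.2)) (fun x => x) = some (pvW c0.2 t) := by
  rw [List.map_cons, PySem.List.max?_id_cons]
  congr 1
  rw [pvW, List.foldl_map]

theorem encontrar_maior_disco_spec : Claim_unchanged_encontrar_maior_disco := by
  intro pinos destino _
  unfold Spec_encontrar_maior_disco
  intro hnD
  rw [pvA_eq_fold]
  unfold encontrar_maior_disco_alt
  cases hcs : pvCands pinos destino with
  | nil => rfl
  | cons c0 t =>
    simp only [pvAlvo c0 t]
    have hhead : List.foldl pvStepA ((-1 : Int), (none : Option Int)) (c0 :: t)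
        = List.foldl pvStepA (c0.2, some c0.1) t := by
      simp [pvStepA]
    by_cases hM : pvW c0.2 t = -1
    case neg =>
      -- the sentinel is irrelevant: both sides are the first holder of the overall maximum
      rw [hhead, pvLoopA_spec t c0.2 (some c0.1) hM]
      by_cases hc0 : c0.2 = pvW c0.2 t
      · rw [if_pos hc0, List.find?_cons_of_pos (by simp [← hc0])]
      · rw [if_neg hc0, List.find?_cons_of_neg (by simp [hc0])]
        rcases pvW_attained t c0.2 with h | ⟨d, hd, hdv⟩
        · exact absurd h.symm hc0
        · have hs : (t.find? (fun x => x.2 == pvW c0.2 t)).isSome :=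
            List.find?_isSome.mpr ⟨d, hd, by simp [hdv]⟩
          rcases Option.isSome_iff_exists.mp hs with ⟨e, he⟩
          rw [he]
          rfl
    case pos =>
      -- overall maximum is exactly the sentinel -1: use ¬ D
      -- every candidate value is ≤ -1
      have hub : ∀ c ∈ c0 :: t, c.2 ≤ (-1 : Int) := by
        intro c hc
        rcases List.mem_cons.mp hc with rfl | hc
        · rw [← hM]; exact le_pvW t c.2
        · rw [← hM]; exact pvW_ub t c0.2 c hc
      -- condition A1 of D: all disks on considered pegs are ≤ -1
      have hA1 : ∀ ip ∈ PySem.List.enumerate pinos, ip.1 ≠ destino →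
          ∀ x ∈ ip.2, x ≤ (-1 : Int) := by
        intro ip hip hK1 x hx
        have hK : ip.1 ≠ destino ∧ ip.2 ≠ [] := ⟨hK1, List.ne_nil_of_mem hx⟩
        cases hm : PySem.List.max? ip.2 (fun y => y) with
        | none => exact absurd ((PySem.List.max?_eq_none_iff _ _).mp hm) hK.2
        | some m =>
          have hmem : (ip.1, m) ∈ pvCands pinos destino :=
            (pvCands_mem pinos destino (ip.1, m)).mpr ⟨ip, hip, hK, hm, rfl⟩
          rw [hcs] at hmem
          have hm1 : m ≤ (-1 : Int) := hub (ip.1, m) hmem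
          exact le_trans (PySem.List.max?_isMax hm x hx) hm1
      -- condition A2 of D: some considered peg holds a -1
      have hA2 : ∃ ip ∈ PySem.List.enumerate pinos, (ip.1 ≠ destino ∧ ip.2 ≠ []) ∧
          (-1 : Int) ∈ ip.2 := by
        have hatt : ∃ d ∈ c0 :: t, d.2 = (-1 : Int) := by
          rcases pvW_attained t c0.2 with h | ⟨d, hd, hdv⟩
          · exact ⟨c0, List.mem_cons_self .., by rw [← hM, h]⟩
          · exact ⟨d, List.mem_cons_of_mem _ hd, by rw [hdv, hM]⟩
        rcases hatt with ⟨d, hd, hdv⟩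
        rcases (pvCands_mem pinos destino d).mp (by rw [hcs]; exact hd) with
          ⟨ip, hip, hK, hmax, _⟩
        refine ⟨ip, hip, hK, ?_⟩
        rw [hdv] at hmax
        exact PySem.List.max?_mem hmax
      -- ¬ D then forces the good corner: a unique, last considered peg holding -1
      -- translate the facts to the C and F of D
      have hP1 : ∀ p ∈ (PySem.List.enumerate pinos).filter (fun p => p.1 ≠ destino ∧ p.2 ≠ []),
          ∀ x ∈ p.2, x ≤ (-1 : Int) := by
        intro p hp x hx
        have hk := List.mem_filter.mp hp
        have hk2 : p.1 ≠ destino ∧ p.2 ≠ [] := by simpa using hk.2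
        exact hA1 p hk.1 hk2.1 x hx
      -- ¬ D then forces the good corner: only the last considered peg can hold a -1
      have hnotdrop : ∀ p ∈ ((PySem.List.enumerate pinos).filter
          (fun p => p.1 ≠ destino ∧ p.2 ≠ [])).dropLast, (-1 : Int) ∉ p.2 := by
        intro p hp hm
        exact hnD ⟨hP1, p, hp, hm⟩
      rcases hA2 with ⟨p0, hp0, hKp0, hm1p0⟩
      have hp0C : p0 ∈ (PySem.List.enumerate pinos).filter
          (fun p => p.1 ≠ destino ∧ p.2 ≠ []) :=
        List.mem_filter.mpr ⟨hp0, by simpa using hKp0⟩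
      cases hLo : ((PySem.List.enumerate pinos).filter (fun p => p.1 ≠ destino ∧ p.2 ≠ [])).getLast? with
      | none =>
        rw [List.getLast?_eq_none_iff.mp hLo] at hp0C
        cases hp0C
      | some L =>
      rcases List.getLast?_eq_some_iff.mp hLo with ⟨C', hC'⟩
      have hdrop : ((PySem.List.enumerate pinos).filter
          (fun p => p.1 ≠ destino ∧ p.2 ≠ [])).dropLast = C' := by
        rw [hC']; exact List.dropLast_concat ..
      -- any considered peg holding -1 must be L
      have honly : ∀ q ∈ (PySem.List.enumerate pinos).filter
          (fun p => p.1 ≠ destino ∧ p.2 ≠ []), (-1 : Int) ∈ q.2 → q = L := by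
        intro q hq hm
        rcases List.mem_append.mp (by rw [hC'] at hq; exact hq) with h | h
        · exact absurd hm (hnotdrop q (by rw [hdrop]; exact h))
        · simpa using h
      have hLC : L ∈ (PySem.List.enumerate pinos).filter (fun p => p.1 ≠ destino ∧ p.2 ≠ []) := by
        rw [hC']; exact List.mem_append_right _ (List.mem_cons_self ..)
      have hLl := List.mem_filter.mp hLC
      have hm1L : (-1 : Int) ∈ L.2 := by
        have := honly p0 hp0C hm1p0
        rw [← this]; exact hm1p0
      have hCpw : List.Pairwise (fun a b => a.1 < b.1)
          ((PySem.List.enumerate pinos).filter (fun p => p.1 ≠ destino ∧ p.2 ≠ [])) :=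
        List.Pairwise.sublist List.filter_sublist (PySem.List.pairwise_lt_enumerate pinos 0)
      have hlastC : ∀ jq ∈ (PySem.List.enumerate pinos).filter (fun p => p.1 ≠ destino ∧ p.2 ≠ []),
          jq.1 ≤ L.1 := by
        intro jq hjq
        rw [hC'] at hjq hCpw
        rcases List.mem_append.mp hjq with h | h
        · rcases List.pairwise_append.mp hCpw with ⟨_, _, h12⟩
          exact le_of_lt (h12 jq h L (List.mem_cons_self ..))
        · simp only [List.mem_singleton] at h
          exact le_of_eq (by rw [h])
      have hU : ∃ ip ∈ PySem.List.enumerate pinos, (ip.1 ≠ destino ∧ ip.2 ≠ []) ∧ (-1 : Int) ∈ ip.2 ∧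
          ∀ jq ∈ PySem.List.enumerate pinos, (jq.1 ≠ destino ∧ jq.2 ≠ []) →
            (((-1 : Int) ∈ jq.2 → jq.1 = ip.1) ∧ jq.1 ≤ ip.1) := by
        have hKL : L.1 ≠ destino ∧ L.2 ≠ [] := by simpa using hLl.2
        refine ⟨L, hLl.1, hKL, hm1L, ?_⟩
        intro jq hjq hKq
        have hjqC : jq ∈ (PySem.List.enumerate pinos).filter (fun p => p.1 ≠ destino ∧ p.2 ≠ []) :=
          List.mem_filter.mpr ⟨hjq, by simpa using hKq⟩
        refine ⟨?_, hlastC jq hjqC⟩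
        intro hm1q
        rw [honly jq hjqC hm1q]
      rcases hU with ⟨ips, hips, hKs, hm1s, hlast⟩
      -- the peg ips produces candidate (ips.1, -1)
      have hgs : (ips.1, (-1 : Int)) ∈ pvCands pinos destino := by
        cases hm : PySem.List.max? ips.2 (fun y => y) with
        | none => exact absurd ((PySem.List.max?_eq_none_iff _ _).mp hm) hKs.2
        | some m =>
          have h1 : m ≤ (-1 : Int) := hA1 ips hips hKs.1 m (PySem.List.max?_mem hm)
          have h2 : (-1 : Int) ≤ m := PySem.List.max?_isMax hm (-1) hm1s
          have hm1 : m = (-1 : Int) := le_antisymm h1 h2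
          exact (pvCands_mem pinos destino (ips.1, -1)).mpr
            ⟨ips, hips, hKs, by rw [hm, hm1], rfl⟩
      rw [hcs] at hgs
      rcases List.append_of_mem hgs with ⟨pref, suf, hsplit⟩
      have hpw := pvCands_fst pinos destino
      rw [hcs, hsplit] at hpw
      rcases List.pairwise_append.mp hpw with ⟨hp1, hp2, hp12⟩
      rcases List.pairwise_cons.mp hp2 with ⟨hjsuf, _⟩
      -- no candidate comes after (ips.1, -1)
      have hsufnil : suf = [] := by
        cases suf with
        | nil => rfl
        | cons d suf' =>
          have hdm : d ∈ pvCands pinos destino := by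
            rw [hcs, hsplit]
            exact List.mem_append_right _ (List.mem_cons_of_mem _ (List.mem_cons_self ..))
          rcases (pvCands_mem pinos destino d).mp hdm with ⟨ip', hip', hK', _, hfst'⟩
          have hle : ip'.1 ≤ ips.1 := (hlast ip' hip' hK').2
          have hlt : ips.1 < d.1 := hjsuf d (List.mem_cons_self ..)
          rw [hfst'] at hlt
          omega
      subst hsufnil
      -- every earlier candidate is strictly below -1
      have hpref : ∀ c ∈ pref, c.2 < (-1 : Int) := by
        intro c hc
        have hclt : c.1 < ips.1 := hp12 c hc (ips.1, -1) (List.mem_cons_self ..)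
        have hcm : c ∈ pvCands pinos destino := by
          rw [hcs, hsplit]; exact List.mem_append_left _ hc
        rcases (pvCands_mem pinos destino c).mp hcm with ⟨ip', hip', hK', hmax', hfst'⟩
        have hnm1 : (-1 : Int) ∉ ip'.2 := by
          intro hmem
          have := (hlast ip' hip' hK').1 hmem
          rw [hfst', this] at hclt
          omega
        have h1 : c.2 ≤ (-1 : Int) := hA1 ip' hip' hK'.1 c.2 (PySem.List.max?_mem hmax')
        have h2 : c.2 ≠ (-1 : Int) := by
          intro h; rw [h] at hmax'; exact hnm1 (PySem.List.max?_mem hmax')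
        omega
      -- A's loop ends at (ips.1, -1)
      have hAend : List.foldl pvStepA ((-1 : Int), (none : Option Int)) (c0 :: t)
          = ((-1 : Int), some ips.1) := by
        rw [hsplit, List.foldl_append]
        cases pref with
        | nil => simp [pvStepA]
        | cons e pt =>
          have he2 : e.2 < (-1 : Int) := hpref e (List.mem_cons_self ..)
          have hpt : ∀ c ∈ pt, c.2 < (-1 : Int) :=
            fun c hc => hpref c (List.mem_cons_of_mem _ hc)
          have hs1 : (List.foldl pvStepA ((-1 : Int), (none : Option Int)) (e :: pt)).1 < -1 := by
            have hh : List.foldl pvStepA ((-1 : Int), (none : Option Int)) (e :: pt)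
                = List.foldl pvStepA (e.2, some e.1) pt := by simp [pvStepA]
            rw [hh]
            exact pvLoopA_fst_lt pt e.2 (some e.1) he2 hpt
          rw [List.foldl_cons, List.foldl_nil]
          show pvStepA _ (ips.1, -1) = _
          simp only [pvStepA]
          rw [if_pos (Or.inr (by omega))]
      -- B finds the same pair: earlier candidates all fail the test
      have hBfind : List.find? (fun c => c.2 == (-1 : Int)) (c0 :: t)
          = some (ips.1, (-1 : Int)) := by
        rw [hsplit, List.find?_append]
        have h1 : List.find? (fun c => c.2 == (-1 : Int)) pref = none :=
          List.find?_eq_none.mpr (fun c hc => by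
            have := hpref c hc; simp; omega)
        rw [h1]
        simp
      rw [hAend, hM, hBfind]


theorem encontrar_maior_disco_changed : Claim_changed_encontrar_maior_disco := by
  unfold Claim_changed_encontrar_maior_disco; decide

theorem encontrar_maior_disco_tight : Claim_exact_encontrar_maior_disco := by
  intro pinos destino _ hD
  rcases hD with ⟨hP1, p, hpdl, hm1p⟩
  have hpC : p ∈ pvCons pinos destino := List.Sublist.mem hpdl (List.dropLast_sublist _)
  have hcsle : ∀ d ∈ pvCands pinos destino, d.2 ≤ (-1 : Int) := by
    intro d hd
    rcases (pvCands_mem pinos destino d).mp hd with ⟨ip, hip, hK, hmax, _⟩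
    exact hP1 ip (List.mem_filter.mpr ⟨hip, by simpa using hK⟩) d.2 (PySem.List.max?_mem hmax)
  have hpK := List.mem_filter.mp hpC
  have hKp : p.1 ≠ destino ∧ p.2 ≠ [] := by simpa using hpK.2
  have hmaxp : PySem.List.max? p.2 (fun x => x) = some (-1) := by
    cases hm : PySem.List.max? p.2 (fun y => y) with
    | none => exact absurd ((PySem.List.max?_eq_none_iff _ _).mp hm) hKp.2
    | some m =>
      have h1 : m ≤ -1 := hP1 p hpC m (PySem.List.max?_mem hm)
      have h2 : (-1 : Int) ≤ m := PySem.List.max?_isMax hm (-1) hm1p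
      have h3 : m = -1 := by omega
      exact congrArg some h3
  have hpcs : (p.1, (-1 : Int)) ∈ pvCands pinos destino :=
    (pvCands_mem pinos destino (p.1, -1)).mpr ⟨p, hpK.1, hKp, hmaxp, rfl⟩
  cases hcs : pvCands pinos destino with
  | nil => rw [hcs] at hpcs; cases hpcs
  | cons c0 t =>
  rw [hcs] at hpcs
  have hM : pvW c0.2 t = -1 := by
    have hle : pvW c0.2 t ≤ -1 := by
      rcases pvW_attained t c0.2 with h | ⟨d, hd, hdv⟩
      · rw [h]; exact hcsle c0 (hcs ▸ List.mem_cons_self ..)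
      · rw [← hdv]; exact hcsle d (hcs ▸ List.mem_cons_of_mem _ hd)
    have hge : (-1 : Int) ≤ pvW c0.2 t := by
      rcases List.mem_cons.mp hpcs with h | h
      · have h2 : c0.2 = -1 := by rw [← h]
        have := le_pvW t c0.2
        omega
      · have := pvW_ub t c0.2 (p.1, -1) h
        simpa using this
    omega
  have hfindS : ∃ c, List.find? (fun c => c.2 == (-1 : Int)) (c0 :: t) = some c :=
    Option.isSome_iff_exists.mp (List.find?_isSome.mpr ⟨(p.1, -1), hpcs, by simp⟩)
  rcases hfindS with ⟨c, hfind⟩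
  rcases List.find?_eq_some_iff_append.mp hfind with ⟨hpred, pre, suf, hdec, hprefail⟩
  have hc2 : c.2 = -1 := by simpa using hpred
  have hB : encontrar_maior_disco_alt pinos destino = (some c.1, c.2) := by
    have hstep : encontrar_maior_disco_alt pinos destino =
        match List.find? (fun c => c.2 == (-1 : Int)) (c0 :: t) with
        | some c => (some c.1, c.2)
        | none => (none, -1) := by
      simp only [encontrar_maior_disco_alt, hcs, pvAlvo c0 t, hM]
    rw [hstep, hfind]
  have hCne : pvCons pinos destino ≠ [] := List.ne_nil_of_mem hpC
  have hmapeq := pvCands_eq_map pinos destino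
  have hsufne : suf ≠ [] := by
    intro hsn
    subst hsn
    have hchain : pre ++ [c] = (pvCons pinos destino).dropLast.map pvToCand
        ++ [pvToCand ((pvCons pinos destino).getLast hCne)] := by
      rw [← hdec, ← hcs, hmapeq]
      conv_lhs => rw [← List.dropLast_append_getLast hCne]
      rw [List.map_append]
      rfl
    have hpre : pre = (pvCons pinos destino).dropLast.map pvToCand :=
      List.append_inj_left' hchain rfl
    have hmemp : (p.1, (-1 : Int)) ∈ pre := by
      rw [hpre]
      have hpt : pvToCand p = (p.1, (-1 : Int)) := by simp [pvToCand, hmaxp]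
      rw [← hpt]
      exact List.mem_map_of_mem hpdl
    have := hprefail _ hmemp
    simp at this
  have hApair := pvA_eq_fold pinos destino
  rw [hcs, hdec] at hApair
  have hprelt : ∀ x ∈ pre, x.2 < (-1 : Int) := by
    intro x hx
    have hx1 : x.2 ≤ -1 := by
      refine hcsle x ?_
      rw [hcs, hdec]
      exact List.mem_append_left _ hx
    have hx2 := hprefail x hx
    simp at hx2
    omega
  have hmid : List.foldl pvStepA ((-1 : Int), (none : Option Int)) (pre ++ c :: suf)
      = List.foldl pvStepA ((-1 : Int), some c.1) suf := by
    rw [List.foldl_append]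
    cases pre with
    | nil =>
      simp [pvStepA, hc2]
    | cons e0 pt =>
      have hs1 : (List.foldl pvStepA ((-1 : Int), (none : Option Int)) (e0 :: pt)).1 < -1 := by
        have hh : List.foldl pvStepA ((-1 : Int), (none : Option Int)) (e0 :: pt)
            = List.foldl pvStepA (e0.2, some e0.1) pt := by simp [pvStepA]
        rw [hh]
        exact pvLoopA_fst_lt pt e0.2 (some e0.1)
          (hprelt e0 (List.mem_cons_self ..))
          (fun x hx => hprelt x (List.mem_cons_of_mem _ hx))
      rw [List.foldl_cons]
      have hfire : pvStepA (List.foldl pvStepA ((-1 : Int), (none : Option Int)) (e0 :: pt)) c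
          = (c.2, some c.1) := by
        simp only [pvStepA]
        rw [if_pos (Or.inr (by omega))]
      rw [hfire, hc2]
  have hA : ∃ e ∈ suf, (encontrar_maior_disco pinos destino).1 = some e.1 := by
    cases suf with
    | nil => exact absurd rfl hsufne
    | cons d suf' =>
      rw [hApair, hmid]
      simp only [List.foldl_cons, pvStepA, true_or, if_true]
      rcases pvLoopA_idx suf' d.2 d.1 with h | ⟨e, he, hee⟩
      · exact ⟨d, List.mem_cons_self .., h⟩
      · exact ⟨e, List.mem_cons_of_mem _ he, hee⟩
  have hpw := pvCands_fst pinos destino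
  rw [hcs, hdec] at hpw
  have hcl : ∀ e ∈ suf, c.1 < e.1 :=
    (List.pairwise_cons.mp (List.pairwise_append.mp hpw).2.1).1
  rcases hA with ⟨e, he, hAe⟩
  intro heq
  rw [hB] at heq
  have h1 : (encontrar_maior_disco pinos destino).1 = some c.1 := by rw [heq]
  rw [hAe] at h1
  have h2 : e.1 = c.1 := Option.some.inj h1
  have h3 := hcl e he
  omega
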